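-- pv_equiv track=rewrite | github.com/zerlinshen/singlecell_factory | workflow/modular/pipeline.py | _compute_tiers
-- ===== SOURCE A (Python) =====
-- MODULE_DEPENDENCIES: dict[str, set[str]] = {
--     "cellranger": set(),
--     "qc": {"cellranger"},
--     "doublet_detection": {"qc"},
--     "clustering": {"doublet_detection"},
--     "cell_cycle": {"clustering"},
--     "batch_correction": {"clustering"},
--     "differential_expression": {"clustering"},
--     "annotation": {"clustering"},
--     "trajectory": {"clustering"},
--     "pseudo_velocity": {"trajectory"},
--     "rna_velocity": {"clustering"},
--     "cnv_inference": {"clustering"},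
--     "pathway_analysis": {"differential_expression"},
--     "cell_communication": {"annotation"},
--     "gene_regulatory_network": {"clustering"},
--     "validate_cbioportal": {"differential_expression"},
--     "immune_phenotyping": {"annotation"},
--     "tumor_microenvironment": {"annotation"},
--     "gene_signature_scoring": {"clustering"},
--     "evolution": {"cnv_inference", "trajectory"},
--     "pseudobulk_de": {"differential_expression"},
--     "cell_fate": {"trajectory"},
--     "composition": {"annotation"},
--     "metacell": {"clustering"},
-- }
--
-- _MODULE_COST: dict[str, int] = {
--     "rna_velocity": 10,
--     "cnv_inference": 5,
--     "evolution": 5,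
--     "trajectory": 4,
--     "differential_expression": 3,
--     "clustering": 3,
--     "immune_phenotyping": 2,
--     "tumor_microenvironment": 2,
--     "pathway_analysis": 2,
--     "cell_communication": 2,
--     "pseudobulk_de": 2,
--     "metacell": 2,
--     "cell_fate": 2,
-- }
--
-- def _compute_tiers(execution_order: list[str], completed: set[str]) -> list[list[str]]:
--     """Group remaining modules into tiers for parallel execution.
--
--     A tier is a set of modules whose dependencies are all satisfied by
--     previously completed tiers plus the *completed* set.  Within each tier,
--     modules are sorted by estimated cost (heaviest first) so that the
--     longest-running job starts first in the thread pool.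
--     """
--     remaining = [m for m in execution_order if m not in completed]
--     done = set(completed)
--     tiers: list[list[str]] = []
--     while remaining:
--         tier = [
--             m for m in remaining
--             if MODULE_DEPENDENCIES.get(m, set()).issubset(done)
--         ]
--         if not tier:
--             # Shouldn't happen with a valid topo sort, but be safe.
--             tier = [remaining[0]]
--         # Sort by cost descending so heavy modules start first in parallel
--         tier.sort(key=lambda m: _MODULE_COST.get(m, 1), reverse=True)
--         tiers.append(tier)
--         done.update(tier)
--         remaining = [m for m in remaining if m not in done]
--     return tiers
-- ===== SOURCE B (Python) =====
-- # B: compute each module's tier number directly as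
-- # 1 + max(tier of its dependencies) over the fixed dependency DAG, then
-- # group modules by tier number and cost-sort each group, instead of A's
-- # repeated full rescans of the remaining list.
-- MODULE_DEPENDENCIES: dict[str, set[str]] = {
--     "cellranger": set(),
--     "qc": {"cellranger"},
--     "doublet_detection": {"qc"},
--     "clustering": {"doublet_detection"},
--     "cell_cycle": {"clustering"},
--     "batch_correction": {"clustering"},
--     "differential_expression": {"clustering"},
--     "annotation": {"clustering"},
--     "trajectory": {"clustering"},
--     "pseudo_velocity": {"trajectory"},
--     "rna_velocity": {"clustering"},
--     "cnv_inference": {"clustering"},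
--     "pathway_analysis": {"differential_expression"},
--     "cell_communication": {"annotation"},
--     "gene_regulatory_network": {"clustering"},
--     "validate_cbioportal": {"differential_expression"},
--     "immune_phenotyping": {"annotation"},
--     "tumor_microenvironment": {"annotation"},
--     "gene_signature_scoring": {"clustering"},
--     "evolution": {"cnv_inference", "trajectory"},
--     "pseudobulk_de": {"differential_expression"},
--     "cell_fate": {"trajectory"},
--     "composition": {"annotation"},
--     "metacell": {"clustering"},
-- }
--
-- _MODULE_COST: dict[str, int] = {
--     "rna_velocity": 10,
--     "cnv_inference": 5,
--     "evolution": 5,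
--     "trajectory": 4,
--     "differential_expression": 3,
--     "clustering": 3,
--     "immune_phenotyping": 2,
--     "tumor_microenvironment": 2,
--     "pathway_analysis": 2,
--     "cell_communication": 2,
--     "pseudobulk_de": 2,
--     "metacell": 2,
--     "cell_fate": 2,
-- }
--
-- def _compute_tiers(execution_order: list[str], completed: set[str]) -> list[list[str]]:
--     """Group remaining modules into cost-sorted parallel tiers in one topological pass."""
--     pending = [m for m in execution_order if m not in completed]
--     available = set(pending)
--
--     def tier_of(m: str) -> int:
--         # tier number = 1 + max tier of its (not yet completed) dependencies;
--         # the dependency graph is a fixed acyclic constant, so plain recursion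
--         # terminates and its depth is bounded by a small constant.
--         if m in completed:
--             return 0
--         level = 0
--         for d in MODULE_DEPENDENCIES.get(m, set()):
--             if d not in completed and d not in available:
--                 raise ValueError(f"unsatisfiable dependency {d!r} of module {m!r}")
--             level = max(level, tier_of(d))
--         return level + 1
--
--     top = 0
--     for m in pending:
--         top = max(top, tier_of(m))
--     return [
--         sorted((m for m in pending if tier_of(m) == k),
--                key=lambda m: _MODULE_COST.get(m, 1), reverse=True)
--         for k in range(1, top + 1)
--     ]
-- ===== Notes on version B (the rewrite author's own statement) =====
-- stated objective: alternative
-- what changed: A repeatedly rescans and rebuilds the remaining list once per tier until it is empty; B computes each pending module's tier number directly as 1 + max(tier of its dependencies) over the fixed dependency DAG, then groups the pending modules by tier number and cost-sorts each group.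
-- outside the precondition, e.g. on _compute_tiers(['qc'], set()): A returns [['qc']], B raises ValueError; on _compute_tiers(['evolution', 'qc'], set()): A returns [['evolution'], ['qc']], B raises ValueError
import Mathlib
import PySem

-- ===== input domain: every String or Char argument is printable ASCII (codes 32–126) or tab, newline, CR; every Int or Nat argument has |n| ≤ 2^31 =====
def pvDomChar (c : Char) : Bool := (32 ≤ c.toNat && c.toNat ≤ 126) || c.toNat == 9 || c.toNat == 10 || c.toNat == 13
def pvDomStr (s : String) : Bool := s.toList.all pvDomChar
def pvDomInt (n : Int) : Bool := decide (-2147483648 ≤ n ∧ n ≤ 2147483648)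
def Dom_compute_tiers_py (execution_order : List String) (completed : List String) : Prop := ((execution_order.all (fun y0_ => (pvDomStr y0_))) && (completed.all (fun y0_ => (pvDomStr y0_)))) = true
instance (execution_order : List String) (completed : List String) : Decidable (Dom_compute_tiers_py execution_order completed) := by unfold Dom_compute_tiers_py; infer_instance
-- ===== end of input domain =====

-- B replaces A's repeated whole-list rescans by a single-pass tier computation
-- (tier = 1 + max tier of dependencies over the fixed DAG), then groups by tier
-- number and cost-sorts each group; equivalence is proved on Pre_ (see below).

-- ===== PORT A =====
-- module-level constants of the Python file (shared by both ports)
def pvModuleDeps : PySem.Dict String (PySem.Set String) := PySem.Dict.mk [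
  ("cellranger", PySem.Set.ofList []),
  ("qc", PySem.Set.ofList ["cellranger"]),
  ("doublet_detection", PySem.Set.ofList ["qc"]),
  ("clustering", PySem.Set.ofList ["doublet_detection"]),
  ("cell_cycle", PySem.Set.ofList ["clustering"]),
  ("batch_correction", PySem.Set.ofList ["clustering"]),
  ("differential_expression", PySem.Set.ofList ["clustering"]),
  ("annotation", PySem.Set.ofList ["clustering"]),
  ("trajectory", PySem.Set.ofList ["clustering"]),
  ("pseudo_velocity", PySem.Set.ofList ["trajectory"]),
  ("rna_velocity", PySem.Set.ofList ["clustering"]),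
  ("cnv_inference", PySem.Set.ofList ["clustering"]),
  ("pathway_analysis", PySem.Set.ofList ["differential_expression"]),
  ("cell_communication", PySem.Set.ofList ["annotation"]),
  ("gene_regulatory_network", PySem.Set.ofList ["clustering"]),
  ("validate_cbioportal", PySem.Set.ofList ["differential_expression"]),
  ("immune_phenotyping", PySem.Set.ofList ["annotation"]),
  ("tumor_microenvironment", PySem.Set.ofList ["annotation"]),
  ("gene_signature_scoring", PySem.Set.ofList ["clustering"]),
  ("evolution", PySem.Set.ofList ["cnv_inference", "trajectory"]),
  ("pseudobulk_de", PySem.Set.ofList ["differential_expression"]),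
  ("cell_fate", PySem.Set.ofList ["trajectory"]),
  ("composition", PySem.Set.ofList ["annotation"]),
  ("metacell", PySem.Set.ofList ["clustering"])
]

def pvModuleCost : PySem.Dict String Int := PySem.Dict.mk [
  ("rna_velocity", 10),
  ("cnv_inference", 5),
  ("evolution", 5),
  ("trajectory", 4),
  ("differential_expression", 3),
  ("clustering", 3),
  ("immune_phenotyping", 2),
  ("tumor_microenvironment", 2),
  ("pathway_analysis", 2),
  ("cell_communication", 2),
  ("pseudobulk_de", 2),
  ("metacell", 2),
  ("cell_fate", 2)
]

-- the `while remaining:` loop of A, step for step; terminates because each round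
-- adds at least one element of `remaining` to `done` (lemma pvLoopA_dec, cited below)
theorem pvLoopA_dec (m0 : String) (rest : List String) (done : PySem.Set String)
    (P : String → Bool) (key : String → Int) :
    ((m0 :: rest).filter (fun m => !((PySem.Set.update done
        (PySem.List.sorted (if (m0 :: rest).filter P = [] then [m0] else (m0 :: rest).filter P) key true)).contains m))).length
      < (m0 :: rest).length := by
  have hx : ∃ x ∈ (m0 :: rest), x ∈ (if (m0 :: rest).filter P = [] then [m0] else (m0 :: rest).filter P) := by
    by_cases hP : (m0 :: rest).filter P = []
    · exact ⟨m0, List.mem_cons_self, by simp [hP]⟩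
    · obtain ⟨x, hx⟩ := List.exists_mem_of_ne_nil _ hP
      exact ⟨x, List.mem_of_mem_filter hx, by simp [hP, hx]⟩
  obtain ⟨x, hxr, hxt⟩ := hx
  have hxs : x ∈ PySem.List.sorted (if (m0 :: rest).filter P = [] then [m0] else (m0 :: rest).filter P) key true :=
    (PySem.List.mem_sorted _ _ _ _).2 hxt
  have hxd : (PySem.Set.update done
      (PySem.List.sorted (if (m0 :: rest).filter P = [] then [m0] else (m0 :: rest).filter P) key true)).contains x = true :=
    (PySem.Set.contains_iff _ _).2 ((PySem.Set.mem_update _ _ _).2 (Or.inr hxs))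
  rw [List.length_filter_lt_length_iff_exists]
  exact ⟨x, hxr, by simp only [hxd]; decide⟩

def pvLoopA : List String → PySem.Set String → List (List String)
  | [], _ => []
  | m0 :: rest, done =>
    -- tier = [m for m in remaining if MODULE_DEPENDENCIES.get(m, set()).issubset(done)]
    let tier0 := (m0 :: rest).filter (fun m => (pvModuleDeps.getD m PySem.Set.empty).issubset done)
    -- if not tier: tier = [remaining[0]]
    let tier1 := if tier0 = [] then [m0] else tier0
    -- tier.sort(key=lambda m: _MODULE_COST.get(m, 1), reverse=True)
    let tier := PySem.List.sorted tier1 (fun m => pvModuleCost.getD m 1) true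
    -- done.update(tier); tiers.append(tier); remaining = [m for m in remaining if m not in done]
    let done' := PySem.Set.update done tier
    tier :: pvLoopA ((m0 :: rest).filter (fun m => !(done'.contains m))) done'
termination_by r _ => r.length
decreasing_by exact pvLoopA_dec m0 rest done _ _

def compute_tiers_py (execution_order : List String) (completed : List String) : List (List String) :=
  let remaining := execution_order.filter (fun m => !(completed.contains m))
  let done := PySem.Set.ofList completed
  pvLoopA remaining done

-- ===== PORT B =====
-- tier_of(m): 1 + max tier of the dependencies of m; the recursion of Source B runs on
-- the fixed acyclic dependency table whose chains have length ≤ 6, so a fuel of 16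
-- never runs out on any reachable call (lemma pvTierOf_stable below); Source B's
-- `raise ValueError` branch (an unsatisfiable dependency) lies outside Pre_.
def pvTierOf (completed : List String) : Nat → String → Int
  | 0, m => if completed.contains m then 0 else 1
  | f + 1, m =>
    if completed.contains m then 0
    else ((pvModuleDeps.getD m PySem.Set.empty).foldl (fun lv d => max lv (pvTierOf completed f d)) 0) + 1

def compute_tiers_py_alt (execution_order : List String) (completed : List String) : List (List String) :=
  let pending := execution_order.filter (fun m => !(completed.contains m))
  let top := pending.foldl (fun t m => max t (pvTierOf completed 16 m)) 0
  (PySem.List.pyRange 1 (top + 1) 1).map (fun k =>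
    PySem.List.sorted (pending.filter (fun m => pvTierOf completed 16 m == k))
      (fun m => pvModuleCost.getD m 1) true)

-- ===== PRECONDITION & SPEC =====
-- Pre_ excludes inputs on which some not-yet-completed module of execution_order has a
-- dependency that is neither completed nor itself anywhere in execution_order: there A's
-- "shouldn't happen with a valid topo sort" safety fallback emits blocked modules one by
-- one in an order no caller specifies, and B raises ValueError on that invalid input.
def Pre_compute_tiers_py (execution_order : List String) (completed : List String) : Prop :=
  ∀ m ∈ execution_order, m ∉ completed →
    ∀ d ∈ (pvModuleDeps.getD m PySem.Set.empty : List String), d ∈ completed ∨ d ∈ execution_order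
instance (execution_order : List String) (completed : List String) : Decidable (Pre_compute_tiers_py execution_order completed) := by unfold Pre_compute_tiers_py; infer_instance
def pvWitness_compute_tiers_py : List String × List String := (["cellranger", "qc", "doublet_detection"], [])

def Spec_compute_tiers_py (execution_order : List String) (completed : List String) (out : List (List String)) : Prop := out = compute_tiers_py_alt execution_order completed
instance (execution_order : List String) (completed : List String) (out : List (List String)) : Decidable (Spec_compute_tiers_py execution_order completed out) := by unfold Spec_compute_tiers_py; infer_instance

-- ===== CLAIM (what is proved, stated in full; the proofs are below) =====
def Claim_equal_compute_tiers_py : Prop := ∀ (execution_order : List String) (completed : List String), Dom_compute_tiers_py execution_order completed → Pre_compute_tiers_py execution_order completed → Spec_compute_tiers_py execution_order completed (compute_tiers_py execution_order completed)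

-- ===== LEMMAS AND PROOFS =====

-- abbreviations for the proofs
def pvDepsL (m : String) : List String := pvModuleDeps.getD m PySem.Set.empty
def pvL (c : List String) (m : String) : Int := pvTierOf c 16 m
def pvPend (eo c : List String) : List String := eo.filter (fun m => !(c.contains m))
def pvTop (eo c : List String) : Int := (pvPend eo c).foldl (fun t m => max t (pvL c m)) 0
def pvSortC (xs : List String) : List String := PySem.List.sorted xs (fun m => pvModuleCost.getD m 1) true

-- depth of a module in the fixed dependency table
def pvRankTable : List (String × Nat) := [("cellranger",1),("qc",2),("doublet_detection",3),("clustering",4),("cell_cycle",5),("batch_correction",5),("differential_expression",5),("annotation",5),("trajectory",5),("pseudo_velocity",6),("rna_velocity",5),("cnv_inference",5),("pathway_analysis",6),("cell_communication",6),("gene_regulatory_network",5),("validate_cbioportal",6),("immune_phenotyping",6),("tumor_microenvironment",6),("gene_signature_scoring",5),("evolution",6),("pseudobulk_de",6),("cell_fate",6),("composition",6),("metacell",5)]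
def pvRank (m : String) : Nat := ((pvRankTable.find? (fun p => p.1 == m)).map (·.2)).getD 1

theorem pvRank_bounds (m : String) : 1 ≤ pvRank m ∧ pvRank m ≤ 6 := by
  unfold pvRank
  cases h : pvRankTable.find? (fun p => p.1 == m) with
  | none => simp
  | some p =>
    have hp : p ∈ pvRankTable := List.mem_of_find?_eq_some h
    have hb : ∀ q ∈ pvRankTable, 1 ≤ q.2 ∧ q.2 ≤ 6 := by decide
    simpa using hb p hp

theorem pvRank_pos (m : String) : 1 ≤ pvRank m := (pvRank_bounds m).1

theorem pvRank_le (m : String) : pvRank m ≤ 6 := (pvRank_bounds m).2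

theorem pvDepsL_rank (m d : String) (hd : d ∈ pvDepsL m) : pvRank d < pvRank m := by
  by_cases h1 : m = "cellranger"
  · subst h1; rw [show pvDepsL "cellranger" = [] from by decide] at hd; simp at hd
  by_cases h2 : m = "qc"
  · subst h2; rw [show pvDepsL "qc" = ["cellranger"] from by decide] at hd
    simp only [List.mem_singleton] at hd; subst hd; decide
  by_cases h3 : m = "doublet_detection"
  · subst h3; rw [show pvDepsL "doublet_detection" = ["qc"] from by decide] at hd
    simp only [List.mem_singleton] at hd; subst hd; decide
  by_cases h4 : m = "clustering"
  · subst h4; rw [show pvDepsL "clustering" = ["doublet_detection"] from by decide] at hd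
    simp only [List.mem_singleton] at hd; subst hd; decide
  by_cases h5 : m = "cell_cycle"
  · subst h5; rw [show pvDepsL "cell_cycle" = ["clustering"] from by decide] at hd
    simp only [List.mem_singleton] at hd; subst hd; decide
  by_cases h6 : m = "batch_correction"
  · subst h6; rw [show pvDepsL "batch_correction" = ["clustering"] from by decide] at hd
    simp only [List.mem_singleton] at hd; subst hd; decide
  by_cases h7 : m = "differential_expression"
  · subst h7; rw [show pvDepsL "differential_expression" = ["clustering"] from by decide] at hd
    simp only [List.mem_singleton] at hd; subst hd; decide
  by_cases h8 : m = "annotation"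
  · subst h8; rw [show pvDepsL "annotation" = ["clustering"] from by decide] at hd
    simp only [List.mem_singleton] at hd; subst hd; decide
  by_cases h9 : m = "trajectory"
  · subst h9; rw [show pvDepsL "trajectory" = ["clustering"] from by decide] at hd
    simp only [List.mem_singleton] at hd; subst hd; decide
  by_cases h10 : m = "pseudo_velocity"
  · subst h10; rw [show pvDepsL "pseudo_velocity" = ["trajectory"] from by decide] at hd
    simp only [List.mem_singleton] at hd; subst hd; decide
  by_cases h11 : m = "rna_velocity"
  · subst h11; rw [show pvDepsL "rna_velocity" = ["clustering"] from by decide] at hd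
    simp only [List.mem_singleton] at hd; subst hd; decide
  by_cases h12 : m = "cnv_inference"
  · subst h12; rw [show pvDepsL "cnv_inference" = ["clustering"] from by decide] at hd
    simp only [List.mem_singleton] at hd; subst hd; decide
  by_cases h13 : m = "pathway_analysis"
  · subst h13; rw [show pvDepsL "pathway_analysis" = ["differential_expression"] from by decide] at hd
    simp only [List.mem_singleton] at hd; subst hd; decide
  by_cases h14 : m = "cell_communication"
  · subst h14; rw [show pvDepsL "cell_communication" = ["annotation"] from by decide] at hd
    simp only [List.mem_singleton] at hd; subst hd; decide
  by_cases h15 : m = "gene_regulatory_network"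
  · subst h15; rw [show pvDepsL "gene_regulatory_network" = ["clustering"] from by decide] at hd
    simp only [List.mem_singleton] at hd; subst hd; decide
  by_cases h16 : m = "validate_cbioportal"
  · subst h16; rw [show pvDepsL "validate_cbioportal" = ["differential_expression"] from by decide] at hd
    simp only [List.mem_singleton] at hd; subst hd; decide
  by_cases h17 : m = "immune_phenotyping"
  · subst h17; rw [show pvDepsL "immune_phenotyping" = ["annotation"] from by decide] at hd
    simp only [List.mem_singleton] at hd; subst hd; decide
  by_cases h18 : m = "tumor_microenvironment"
  · subst h18; rw [show pvDepsL "tumor_microenvironment" = ["annotation"] from by decide] at hd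
    simp only [List.mem_singleton] at hd; subst hd; decide
  by_cases h19 : m = "gene_signature_scoring"
  · subst h19; rw [show pvDepsL "gene_signature_scoring" = ["clustering"] from by decide] at hd
    simp only [List.mem_singleton] at hd; subst hd; decide
  by_cases h20 : m = "evolution"
  · subst h20; rw [show pvDepsL "evolution" = ["cnv_inference", "trajectory"] from by decide] at hd
    simp only [List.mem_cons, List.not_mem_nil, or_false] at hd
    rcases hd with rfl | rfl <;> decide
  by_cases h21 : m = "pseudobulk_de"
  · subst h21; rw [show pvDepsL "pseudobulk_de" = ["differential_expression"] from by decide] at hd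
    simp only [List.mem_singleton] at hd; subst hd; decide
  by_cases h22 : m = "cell_fate"
  · subst h22; rw [show pvDepsL "cell_fate" = ["trajectory"] from by decide] at hd
    simp only [List.mem_singleton] at hd; subst hd; decide
  by_cases h23 : m = "composition"
  · subst h23; rw [show pvDepsL "composition" = ["annotation"] from by decide] at hd
    simp only [List.mem_singleton] at hd; subst hd; decide
  by_cases h24 : m = "metacell"
  · subst h24; rw [show pvDepsL "metacell" = ["clustering"] from by decide] at hd
    simp only [List.mem_singleton] at hd; subst hd; decide
  · simp [pvDepsL, pvModuleDeps, PySem.Dict.getD, PySem.Dict.get?, List.find?,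
      beq_false_of_ne (Ne.symm h1), beq_false_of_ne (Ne.symm h2), beq_false_of_ne (Ne.symm h3), beq_false_of_ne (Ne.symm h4), beq_false_of_ne (Ne.symm h5), beq_false_of_ne (Ne.symm h6), beq_false_of_ne (Ne.symm h7), beq_false_of_ne (Ne.symm h8), beq_false_of_ne (Ne.symm h9), beq_false_of_ne (Ne.symm h10), beq_false_of_ne (Ne.symm h11), beq_false_of_ne (Ne.symm h12), beq_false_of_ne (Ne.symm h13), beq_false_of_ne (Ne.symm h14), beq_false_of_ne (Ne.symm h15), beq_false_of_ne (Ne.symm h16), beq_false_of_ne (Ne.symm h17), beq_false_of_ne (Ne.symm h18), beq_false_of_ne (Ne.symm h19), beq_false_of_ne (Ne.symm h20), beq_false_of_ne (Ne.symm h21), beq_false_of_ne (Ne.symm h22), beq_false_of_ne (Ne.symm h23), beq_false_of_ne (Ne.symm h24)] at hd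

-- generic running-max facts used below
theorem pv_fmax_le (xs : List String) (f : String → Int) (b : Int) : ∀ init : Int,
    (∀ x ∈ xs, f x ≤ b) → init ≤ b → xs.foldl (fun a x => max a (f x)) init ≤ b := by
  induction xs with
  | nil => intro init _ h2; simpa
  | cons y ys ih =>
    intro init h h2
    simp only [List.foldl_cons]
    exact ih _ (fun x hx => h x (List.mem_cons_of_mem _ hx)) (by simp [h2, h y List.mem_cons_self])

theorem pv_fmax_attain (xs : List String) (f : String → Int) : ∀ init : Int,
    xs.foldl (fun a x => max a (f x)) init = init ∨ ∃ x ∈ xs, xs.foldl (fun a x => max a (f x)) init = f x := by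
  induction xs with
  | nil => simp
  | cons y ys ih =>
    intro init
    simp only [List.foldl_cons]
    rcases ih (max init (f y)) with h | ⟨x, hx, hfx⟩
    · rcases max_choice init (f y) with h' | h'
      · exact Or.inl (h.trans h')
      · exact Or.inr ⟨y, List.mem_cons_self, h.trans h'⟩
    · exact Or.inr ⟨x, List.mem_cons_of_mem _ hx, hfx⟩

-- fuel irrelevance for pvTierOf above the rank of the argument
theorem pvTierOf_stable (c : List String) : ∀ (n : Nat) (m : String) (f g : Nat),
    pvRank m ≤ n → pvRank m ≤ f → pvRank m ≤ g → pvTierOf c f m = pvTierOf c g m := by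
  intro n
  induction n with
  | zero => intro m f g hn _ _; have := pvRank_pos m; omega
  | succ n ih =>
    intro m f g hn hf hg
    obtain ⟨f', rfl⟩ : ∃ f', f = f' + 1 := ⟨f - 1, by have := pvRank_pos m; omega⟩
    obtain ⟨g', rfl⟩ : ∃ g', g = g' + 1 := ⟨g - 1, by have := pvRank_pos m; omega⟩
    simp only [pvTierOf]
    by_cases hc : c.contains m = true
    · rw [if_pos hc, if_pos hc]
    · rw [if_neg hc, if_neg hc]
      congr 1
      refine PySem.List.foldl_congr_mem _ _ _ _ (fun acc d hd => ?_)
      have hrd := pvDepsL_rank m d hd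
      rw [ih d f' g' (by omega) (by omega) (by omega)]

theorem pvTierOf_succ (c : List String) (f : Nat) (m : String) :
    pvTierOf c (f + 1) m = if c.contains m then 0
      else ((pvDepsL m).foldl (fun lv d => max lv (pvTierOf c f d)) 0) + 1 := by
  simp only [pvTierOf, pvDepsL]

theorem pvL_unfold (c : List String) (m : String) :
    pvL c m = if c.contains m then 0 else ((pvDepsL m).foldl (fun lv d => max lv (pvL c d)) 0) + 1 := by
  have h16 : pvL c m = pvTierOf c (15 + 1) m := rfl
  rw [h16, pvTierOf_succ]
  by_cases hc : c.contains m = true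
  · rw [if_pos hc, if_pos hc]
  · rw [if_neg hc, if_neg hc]
    have hf : (pvDepsL m).foldl (fun lv d => max lv (pvTierOf c 15 d)) 0
        = (pvDepsL m).foldl (fun lv d => max lv (pvL c d)) 0 :=
      PySem.List.foldl_congr_mem _ _ _ _ (fun acc d hd => by
        rw [show pvL c d = pvTierOf c 16 d from rfl,
          pvTierOf_stable c (pvRank d) d 16 15 le_rfl (by have := pvRank_le d; omega) (by have := pvRank_le d; omega)])
    rw [hf]

theorem pvL_of_mem (c : List String) (m : String) (hc : m ∈ c) : pvL c m = 0 := by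
  rw [pvL_unfold, if_pos (by simpa using hc)]

theorem pvL_pos (c : List String) (m : String) (hc : m ∉ c) : 1 ≤ pvL c m := by
  rw [pvL_unfold, if_neg (by simpa using hc)]
  have := (PySem.List.le_foldl_max_int (pvDepsL m) (pvL c) 0).1
  omega

theorem pvL_dep_lt (c : List String) (m d : String) (hc : m ∉ c) (hd : d ∈ pvDepsL m) :
    pvL c d < pvL c m := by
  conv_rhs => rw [pvL_unfold, if_neg (by simpa using hc)]
  have := (PySem.List.le_foldl_max_int (pvDepsL m) (pvL c) 0).2 d hd
  omega

theorem pvL_le_of_deps (c : List String) (m : String) (k : Int) (hc : m ∉ c)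
    (h : ∀ d ∈ pvDepsL m, pvL c d ≤ k) (hk : 0 ≤ k) : pvL c m ≤ k + 1 := by
  rw [pvL_unfold, if_neg (by simpa using hc)]
  have := pv_fmax_le (pvDepsL m) (pvL c) k 0 h hk
  omega

theorem pvL_attain (c : List String) (m : String) (hc : m ∉ c) (h2 : 2 ≤ pvL c m) :
    ∃ d ∈ pvDepsL m, pvL c d = pvL c m - 1 := by
  have hu := pvL_unfold c m
  rw [if_neg (by simpa using hc)] at hu
  rcases pv_fmax_attain (pvDepsL m) (pvL c) 0 with h | ⟨d, hd, hfd⟩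
  · rw [h] at hu; omega
  · exact ⟨d, hd, by rw [hu, hfd]; omega⟩

-- membership facts about pvPend
theorem pvPend_mem (eo c : List String) (m : String) :
    m ∈ pvPend eo c ↔ m ∈ eo ∧ m ∉ c := by
  simp [pvPend]

-- Pre_ restated through pvPend
theorem pvPre_dep (eo c : List String) (hpre : Pre_compute_tiers_py eo c) (m d : String)
    (hm : m ∈ pvPend eo c) (hd : d ∈ pvDepsL m) (hdc : d ∉ c) : d ∈ pvPend eo c := by
  obtain ⟨hme, hmc⟩ := (pvPend_mem eo c m).1 hm
  rcases hpre m hme hmc d hd with h | h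
  · exact absurd h hdc
  · exact (pvPend_mem eo c d).2 ⟨h, hdc⟩

-- tier numbers of pending modules are contiguous from 1
theorem pvL_exists (eo c : List String) (hpre : Pre_compute_tiers_py eo c) : ∀ (n : Nat) (m : String),
    pvRank m ≤ n → m ∈ pvPend eo c → ∀ j : Int, 1 ≤ j → j ≤ pvL c m →
    ∃ m' ∈ pvPend eo c, pvL c m' = j := by
  intro n
  induction n with
  | zero => intro m hn; have := pvRank_pos m; omega
  | succ n ih =>
    intro m hn hm j hj1 hjm
    by_cases hEq : pvL c m = j
    · exact ⟨m, hm, hEq⟩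
    · have hmc : m ∉ c := ((pvPend_mem eo c m).1 hm).2
      have h2 : 2 ≤ pvL c m := by omega
      obtain ⟨d, hd, hfd⟩ := pvL_attain c m hmc h2
      have hdc : d ∉ c := by
        intro h
        have := pvL_of_mem c d h
        omega
      have hdp : d ∈ pvPend eo c := pvPre_dep eo c hpre m d hm hd hdc
      exact ih d (by have := pvDepsL_rank m d hd; omega) hdp j hj1 (by omega)

theorem pvTop_ge (eo c : List String) (m : String) (hm : m ∈ pvPend eo c) : pvL c m ≤ pvTop eo c :=
  (PySem.List.le_foldl_max_int (pvPend eo c) (pvL c) 0).2 m hm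

theorem pvTop_le (eo c : List String) (b : Int) (hb : 0 ≤ b)
    (h : ∀ m ∈ pvPend eo c, pvL c m ≤ b) : pvTop eo c ≤ b :=
  pv_fmax_le (pvPend eo c) (pvL c) b 0 h hb

theorem pvRange_nil (a b : Int) (h : b ≤ a) : PySem.List.pyRange a b 1 = [] := by
  simp [PySem.List.pyRange]; omega

theorem pvLoopA_nil (done : PySem.Set String) : pvLoopA [] done = [] := by
  rw [pvLoopA]

-- the new remaining list after a round is exactly "tier > k+1" (d2 is the updated done set)
theorem pvRem_eq (eo c : List String) (k : Int) (R : List String) (d2 : PySem.Set String)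
    (hR : (pvPend eo c).filter (fun m => decide (k < pvL c m)) = R)
    (hd2 : ∀ x, PySem.Set.contains d2 x = true ↔ (x ∈ c ∨ (x ∈ pvPend eo c ∧ pvL c x ≤ k + 1))) :
    R.filter (fun m => !(PySem.Set.contains d2 m))
      = (pvPend eo c).filter (fun m => decide (k + 1 < pvL c m)) := by
  rw [← hR, List.filter_filter]
  refine List.filter_congr (fun m hm => ?_)
  have hmc : m ∉ c := ((pvPend_mem eo c m).1 hm).2
  cases hcb : PySem.Set.contains d2 m with
  | true =>
    rcases (hd2 m).1 hcb with h | ⟨_, h⟩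
    · exact absurd h hmc
    · simp only [Bool.not_true, Bool.false_and]
      symm
      simp only [decide_eq_false_iff_not]
      omega
  | false =>
    have hnot : ¬ (pvL c m ≤ k + 1) := by
      intro hle
      have := (hd2 m).2 (Or.inr ⟨hm, hle⟩)
      rw [hcb] at this
      exact Bool.false_ne_true this
    simp only [Bool.not_false, Bool.true_and]
    rw [Bool.eq_iff_iff]
    simp only [decide_eq_true_eq]
    omega

-- the empty case: if no pending module has tier > k, the remaining range is empty
theorem pvMain_empty (eo c : List String) (k : Int) (hk : 0 ≤ k)
    (hnil : (pvPend eo c).filter (fun m => decide (k < pvL c m)) = []) :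
    (PySem.List.pyRange (k + 1) (pvTop eo c + 1) 1).map
      (fun j => pvSortC ((pvPend eo c).filter (fun m => pvL c m == j))) = [] := by
  have htop : pvTop eo c ≤ k := by
    refine pvTop_le eo c k hk (fun m hm => ?_)
    have := List.filter_eq_nil_iff.1 hnil m hm
    simpa using this
  rw [pvRange_nil _ _ (by omega), List.map_nil]

-- the main loop invariant: once exactly the modules of tier ≤ k are done, A's loop
-- emits exactly the cost-sorted tiers k+1 … top
theorem pvLoopA_main (eo c : List String) (hpre : Pre_compute_tiers_py eo c) :
    ∀ (N : Nat) (k : Int) (done : PySem.Set String), 0 ≤ k →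
    ((pvPend eo c).filter (fun m => decide (k < pvL c m))).length ≤ N →
    (∀ x, PySem.Set.contains done x = true ↔ (x ∈ c ∨ (x ∈ pvPend eo c ∧ pvL c x ≤ k))) →
    pvLoopA ((pvPend eo c).filter (fun m => decide (k < pvL c m))) done
      = (PySem.List.pyRange (k + 1) (pvTop eo c + 1) 1).map
          (fun j => pvSortC ((pvPend eo c).filter (fun m => pvL c m == j))) := by
  intro N
  induction N with
  | zero =>
    intro k done hk hlen hdone
    have hnil : (pvPend eo c).filter (fun m => decide (k < pvL c m)) = [] :=
      List.eq_nil_of_length_eq_zero (by omega)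
    rw [hnil, pvMain_empty eo c k hk hnil]
    exact pvLoopA_nil done
  | succ N ih =>
    intro k done hk hlen hdone
    cases hR : (pvPend eo c).filter (fun m => decide (k < pvL c m)) with
    | nil => rw [pvMain_empty eo c k hk hR]; exact pvLoopA_nil done
    | cons m0 rest =>
      -- the eligible modules are exactly those of tier k+1
      have htier0 : (m0 :: rest).filter (fun m => (pvModuleDeps.getD m PySem.Set.empty).issubset done)
          = (pvPend eo c).filter (fun m => pvL c m == k + 1) := by
        rw [← hR, List.filter_filter]
        refine List.filter_congr (fun m hm => ?_)
        have hmp : m ∈ pvPend eo c := hm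
        have hmc : m ∉ c := ((pvPend_mem eo c m).1 hmp).2
        rw [Bool.eq_iff_iff]
        simp only [Bool.and_eq_true, decide_eq_true_eq, beq_iff_eq, PySem.Set.issubset_iff]
        constructor
        · rintro ⟨hsub, hklt⟩
          have hdeps : ∀ d ∈ pvDepsL m, pvL c d ≤ k := by
            intro d hd
            have hdin := ((PySem.Set.contains_iff done d).2 (hsub d hd))
            rcases (hdone d).1 hdin with h | ⟨_, h⟩
            · rw [pvL_of_mem c d h]; omega
            · exact h
          have := pvL_le_of_deps c m k hmc hdeps hk
          omega
        · intro hLm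
          refine ⟨fun d hd => ?_, by omega⟩
          have hdlt : pvL c d < pvL c m := pvL_dep_lt c m d hmc hd
          by_cases hdc : d ∈ c
          · exact (PySem.Set.contains_iff done d).1 ((hdone d).2 (Or.inl hdc))
          · have hdp : d ∈ pvPend eo c := pvPre_dep eo c hpre m d hmp hd hdc
            exact (PySem.Set.contains_iff done d).1 ((hdone d).2 (Or.inr ⟨hdp, by omega⟩))
      -- tier k+1 is nonempty
      have hm0 : m0 ∈ pvPend eo c ∧ k < pvL c m0 := by
        have : m0 ∈ (pvPend eo c).filter (fun m => decide (k < pvL c m)) := by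
          rw [hR]; exact List.mem_cons_self
        have := List.mem_filter.1 this
        simpa using this
      obtain ⟨m', hm'p, hm'L⟩ :=
        pvL_exists eo c hpre (pvRank m0) m0 le_rfl hm0.1 (k + 1) (by omega) (by omega)
      have hne : (pvPend eo c).filter (fun m => pvL c m == k + 1) ≠ [] :=
        List.ne_nil_of_mem (List.mem_filter.2 ⟨hm'p, by simp [hm'L]⟩)
      -- unfold one round of the loop
      rw [pvLoopA, htier0, if_neg hne]
      -- the new done set is exactly "tier ≤ k+1"
      have hdone' : ∀ x, PySem.Set.contains (PySem.Set.update done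
          (PySem.List.sorted ((pvPend eo c).filter (fun m => pvL c m == k + 1))
            (fun m => pvModuleCost.getD m 1) true)) x = true
          ↔ (x ∈ c ∨ (x ∈ pvPend eo c ∧ pvL c x ≤ k + 1)) := by
        intro x
        rw [PySem.Set.contains_iff, PySem.Set.mem_update]
        rw [PySem.List.mem_sorted]
        rw [List.mem_filter]
        simp only [beq_iff_eq]
        constructor
        · rintro (h | ⟨hxp, hxL⟩)
          · rcases (hdone x).1 ((PySem.Set.contains_iff done x).2 h) with h' | ⟨h1, h2⟩
            · exact Or.inl h'
            · exact Or.inr ⟨h1, by omega⟩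
          · exact Or.inr ⟨hxp, by omega⟩
        · rintro (h | ⟨hxp, hxL⟩)
          · exact Or.inl ((PySem.Set.contains_iff done x).1 ((hdone x).2 (Or.inl h)))
          · by_cases hEq : pvL c x = k + 1
            · exact Or.inr ⟨hxp, hEq⟩
            · exact Or.inl ((PySem.Set.contains_iff done x).1 ((hdone x).2 (Or.inr ⟨hxp, by omega⟩)))
      have hrem := pvRem_eq eo c k (m0 :: rest)
        (PySem.Set.update done
          (PySem.List.sorted ((pvPend eo c).filter (fun m => pvL c m == k + 1))
            (fun m => pvModuleCost.getD m 1) true)) hR hdone'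
      rw [hrem]
      -- the recursive call: length strictly decreased
      have hlt : ((pvPend eo c).filter (fun m => decide (k + 1 < pvL c m))).length ≤ N := by
        have h1 : ((pvPend eo c).filter (fun m => decide (k + 1 < pvL c m))).length
            < (m0 :: rest).length := by
          rw [← hrem, List.length_filter_lt_length_iff_exists]
          refine ⟨m', ?_, ?_⟩
          · rw [← hR]
            exact List.mem_filter.2 ⟨hm'p, by simp; omega⟩
          · simp only [Bool.not_eq_true', Bool.not_eq_false]
            exact (hdone' m').2 (Or.inr ⟨hm'p, by omega⟩)
        have h2 : (m0 :: rest).length ≤ N + 1 := by rw [← hR]; exact hlen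
        omega
      rw [ih (k + 1) _ (by omega) hlt hdone']
      -- peel k+1 off the range on the right
      have hktop : k + 1 < pvTop eo c + 1 := by
        have := pvTop_ge eo c m' hm'p
        omega
      rw [PySem.List.pyRange_one_cons hktop, List.map_cons]
      rfl

-- ===== VERDICT (by name: the statement is the Claim_ definition above) =====
theorem compute_tiers_py_spec : Claim_equal_compute_tiers_py := by
  intro eo c _ hpre
  show compute_tiers_py eo c = compute_tiers_py_alt eo c
  have hdone0 : ∀ x, PySem.Set.contains (PySem.Set.ofList c) x = true
      ↔ (x ∈ c ∨ (x ∈ pvPend eo c ∧ pvL c x ≤ 0)) := by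
    intro x
    rw [PySem.Set.contains_iff, PySem.Set.mem_ofList]
    constructor
    · exact Or.inl
    · rintro (h | ⟨hxp, hxL⟩)
      · exact h
      · exact absurd hxL (by have := pvL_pos c x ((pvPend_mem eo c x).1 hxp).2; omega)
  have hfil : (pvPend eo c).filter (fun m => decide (0 < pvL c m)) = pvPend eo c := by
    refine List.filter_eq_self.2 (fun m hm => ?_)
    have := pvL_pos c m ((pvPend_mem eo c m).1 hm).2
    simp only [decide_eq_true_eq]
    omega
  have hmain := pvLoopA_main eo c hpre
    ((pvPend eo c).filter (fun m => decide (0 < pvL c m))).length 0 (PySem.Set.ofList c)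
    le_rfl le_rfl hdone0
  rw [hfil] at hmain
  show pvLoopA (pvPend eo c) (PySem.Set.ofList c) = compute_tiers_py_alt eo c
  rw [hmain, zero_add]
  rfl
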